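-- pv_equiv track=rewrite | github.com/drrusdev/adventofcode-2025 | Day 3/main.py | highest_num_task_two
-- ===== SOURCE A (Python) =====
-- def highest_num_task_two(number_str):
--     num_to_remove = len(number_str) - 12
--
--     stack = []
--     removals_left = num_to_remove
--
--     for digit in number_str:
--         while stack and removals_left > 0 and stack[-1] < digit:
--             stack.pop()
--             removals_left -= 1
--
--         stack.append(digit)
--
--     while removals_left > 0:
--         stack.pop()
--         removals_left -= 1
--
--     return ''.join(stack)
-- ===== SOURCE B (Python) =====
-- def highest_num_task_two(number_str):
--     digits = list(number_str)
--     for _ in range(len(number_str) - 12):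
--         for i in range(len(digits) - 1):
--             if digits[i] < digits[i + 1]:
--                 del digits[i]
--                 break
--         else:
--             digits.pop()
--     return ''.join(digits)
-- ===== Notes on version B (the rewrite author's own statement) =====
-- stated objective: alternative
-- what changed: Replaces the single-pass monotonic stack with repeated left-to-right passes, each pass deleting the first digit that is smaller than its successor (or the last digit if none), once per digit to remove.
import Mathlib
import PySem

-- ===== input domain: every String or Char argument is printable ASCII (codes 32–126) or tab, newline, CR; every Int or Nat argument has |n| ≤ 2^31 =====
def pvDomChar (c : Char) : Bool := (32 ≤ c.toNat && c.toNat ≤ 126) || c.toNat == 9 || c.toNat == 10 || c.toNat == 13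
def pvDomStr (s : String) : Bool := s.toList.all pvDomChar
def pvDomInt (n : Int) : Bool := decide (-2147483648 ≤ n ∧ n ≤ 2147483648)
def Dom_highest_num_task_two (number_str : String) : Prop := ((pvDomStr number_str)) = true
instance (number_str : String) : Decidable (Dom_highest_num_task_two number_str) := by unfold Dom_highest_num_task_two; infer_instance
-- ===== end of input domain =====

-- B replaces A's single-pass monotonic stack by repeated passes, each deleting the
-- first digit smaller than its successor (alternative decomposition, not faster).

-- ===== PORT A =====
-- the inner 'while stack and removals_left > 0 and stack[-1] < digit' loop
def popPhase (stack : List Char) (r : Int) (c : Char) : List Char × Int :=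
  if h : stack ≠ [] ∧ 0 < r ∧ stack.getLastD c < c then
    popPhase stack.dropLast (r - 1) c
  else (stack, r)
termination_by stack.length
decreasing_by
  have : stack.length ≠ 0 := fun hn => h.1 (List.length_eq_zero_iff.mp hn)
  simp [List.length_dropLast]; omega

-- the 'for digit in number_str' loop (state: stack, removals_left)
def processA (stack : List Char) (r : Int) : List Char → List Char × Int
  | [] => (stack, r)
  | c :: rest =>
    let p := popPhase stack r c
    processA (p.1 ++ [c]) p.2 rest

-- the final 'while removals_left > 0' loop
def finalPop (stack : List Char) (r : Int) : List Char :=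
  if 0 < r then finalPop stack.dropLast (r - 1) else stack
termination_by r.toNat
decreasing_by omega

def highest_num_task_two (number_str : String) : String :=
  let p := processA [] ((number_str.toList.length : Int) - 12) number_str.toList
  String.ofList (finalPop p.1 p.2)

-- ===== PORT B =====
-- one pass: delete the first digit that is smaller than its successor, else the last digit
def removeOne : List Char → List Char
  | [] => []
  | [_] => []
  | a :: b :: t => if a < b then b :: t else a :: removeOne (b :: t)

def highest_num_task_two_alt (number_str : String) : String :=
  let ds := number_str.toList
  String.ofList (removeOne^[((ds.length : Int) - 12).toNat] ds)

-- ===== PRECONDITION & SPEC =====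
def Spec_highest_num_task_two (number_str : String) (out : String) : Prop := out = highest_num_task_two_alt number_str
instance (number_str : String) (out : String) : Decidable (Spec_highest_num_task_two number_str out) := by unfold Spec_highest_num_task_two; infer_instance

-- ===== CLAIM (what is proved, stated in full; the proofs are below) =====
def Claim_equal_highest_num_task_two : Prop := ∀ (number_str : String), Dom_highest_num_task_two number_str → Spec_highest_num_task_two number_str (highest_num_task_two number_str)

-- ===== LEMMAS AND PROOFS =====

def runA (s : List Char) (r : Int) (l : List Char) : List Char :=
  let p := processA s r l
  finalPop p.1 p.2

theorem popPhase_nonpos (s : List Char) (r : Int) (c : Char) (h : r ≤ 0) :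
    popPhase s r c = (s, r) := by
  unfold popPhase
  rw [dif_neg]
  rintro ⟨-, hr, -⟩; omega

theorem popPhase_nil (r : Int) (c : Char) : popPhase [] r c = ([], r) := by
  unfold popPhase; simp

theorem popPhase_no (s : List Char) (r : Int) (c : Char) (h : ¬ s.getLastD c < c) :
    popPhase s r c = (s, r) := by
  unfold popPhase
  rw [dif_neg]
  rintro ⟨-, -, hl⟩; exact h hl

theorem processA_nonpos (l : List Char) (s : List Char) (r : Int) (h : r ≤ 0) :
    processA s r l = (s ++ l, r) := by
  induction l generalizing s with
  | nil => simp [processA]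
  | cons c rest ih => simp [processA, popPhase_nonpos _ _ _ h, ih, List.append_assoc]

theorem finalPop_nonpos (s : List Char) (r : Int) (h : r ≤ 0) : finalPop s r = s := by
  unfold finalPop
  rw [if_neg]; omega

theorem finalPop_nil (s : List Char) (r : Int) (h : s = []) : finalPop s r = [] := by
  induction s, r using finalPop.induct with
  | case1 s r hr ih => unfold finalPop; rw [if_pos hr]; exact ih (by simp [h])
  | case2 s r hr => unfold finalPop; rw [if_neg hr]; exact h

theorem finalPop_concat (s : List Char) (a : Char) (r : Int) (h : 0 < r) :
    finalPop (s ++ [a]) r = finalPop s (r - 1) := by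
  conv_lhs => unfold finalPop
  rw [if_pos h, List.dropLast_concat]

theorem removeOne_nil : removeOne [] = [] := rfl

-- key commutation: one budget unit of A equals one removeOne pass, given a
-- nonincreasing stack whose last element dominates the head of the input
theorem key (l : List Char) (s : List Char) (r : Int) (hr : 0 ≤ r) (hl : l ≠ [])
    (hs : List.IsChain (fun x y : Char => y ≤ x) s)
    (hj : ∀ g ∈ s.getLast?, ∀ a ∈ l.head?, a ≤ g) :
    runA s (r + 1) l = runA s r (removeOne l) := by
  induction l generalizing s with
  | nil => exact absurd rfl hl
  | cons a t ih =>
    have hnopop : ∀ r' : Int, popPhase s r' a = (s, r') := by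
      intro r'
      cases s with
      | nil => exact popPhase_nil _ _
      | cons x xs =>
        apply popPhase_no
        have hg : (x :: xs).getLast? = some ((x :: xs).getLast (by simp)) :=
          List.getLast?_eq_some_getLast (by simp)
        have hle := hj ((x :: xs).getLast (by simp)) (by simp [Option.mem_def, hg]) a rfl
        rw [List.getLastD_eq_getLast?, hg]
        simpa using not_lt.mpr hle
    cases t with
    | nil =>
      -- l = [a] : remove the last digit
      simp only [removeOne, runA, processA, hnopop]
      rw [finalPop_concat _ _ _ (by omega)]
      norm_num
    | cons b t' =>
      by_cases hab : a < b
      · -- first ascent is at the head: both runs continue identically from (s, r) at digit b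
        simp only [removeOne, if_pos hab, runA, processA, hnopop]
        have hpop : popPhase (s ++ [a]) (r + 1) b = popPhase s r b := by
          have hcond : (s ++ [a]) ≠ [] ∧ 0 < r + 1 ∧ (s ++ [a]).getLastD b < b :=
            ⟨by simp, by omega, by rw [List.getLastD_concat]; exact hab⟩
          conv_lhs => unfold popPhase
          rw [dif_pos hcond, List.dropLast_concat]
          norm_num
        rw [hpop]
      · -- keep a on the stack and recurse
        simp only [removeOne, if_neg hab, runA, processA, hnopop]
        have hs' : List.IsChain (fun x y : Char => y ≤ x) (s ++ [a]) := by
          refine hs.append (by simp) ?_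
          intro x hx y hy
          simp at hy; subst hy
          exact hj x hx a rfl
        have hj' : ∀ g ∈ (s ++ [a]).getLast?, ∀ c ∈ (b :: t').head?, c ≤ g := by
          intro g hg c hc
          simp at hg hc; subst hg; subst hc
          exact not_lt.mp hab
        exact ih (s ++ [a]) (by simp) hs' hj'

theorem main_eq (k : Nat) (l : List Char) : runA [] (k : Int) l = removeOne^[k] l := by
  induction k generalizing l with
  | zero => simp [runA, processA_nonpos _ _ _ le_rfl, finalPop_nonpos _ _ le_rfl]
  | succ k ih =>
    cases l with
    | nil =>
      rw [Function.iterate_fixed removeOne_nil]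
      simp [runA, processA, finalPop_nil _ _ rfl]
    | cons a t =>
      have h1 : ((k + 1 : Nat) : Int) = (k : Int) + 1 := by push_cast; ring
      rw [h1, key (a :: t) [] (k : Int) (by positivity) (by simp) (by simp) (by simp), ih,
        Function.iterate_succ_apply]

theorem bridge (l : List Char) :
    finalPop (processA [] ((l.length : Int) - 12) l).1 (processA [] ((l.length : Int) - 12) l).2
      = removeOne^[((l.length : Int) - 12).toNat] l := by
  by_cases h : 12 ≤ l.length
  · have hk : ((l.length : Int) - 12) = ((l.length - 12 : Nat) : Int) := by push_cast [h]; ring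
    have ht : ((l.length : Int) - 12).toNat = l.length - 12 := by omega
    rw [ht, hk]
    simpa [runA] using main_eq (l.length - 12) l
  · have hneg : (l.length : Int) - 12 ≤ 0 := by omega
    have ht : ((l.length : Int) - 12).toNat = 0 := by omega
    rw [processA_nonpos _ _ _ hneg, ht]
    simp [finalPop_nonpos _ _ hneg]

-- ===== VERDICT (by name: the statement is the Claim_ definition above) =====
theorem highest_num_task_two_spec : Claim_equal_highest_num_task_two := by
  intro s _
  unfold Spec_highest_num_task_two highest_num_task_two highest_num_task_two_alt
  exact congrArg String.ofList (bridge s.toList)
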